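-- pv_equiv track=rewrite | github.com/GeoFFerDev/shenanigans | lua_deobfuscator.py | _hex16_decode
-- ===== SOURCE A (Python) =====
-- from typing import List, Dict, Optional, Tuple, Any
--
-- def _hex16_decode(s: str, nib_map: Dict, key: int) -> List[int]:
--     result  = []
--     rolling = key
--     i       = 0
--     while i + 1 < len(s):
--         n0 = nib_map.get(s[i],   0)
--         n1 = nib_map.get(s[i+1], 0)
--         bv = (n0 * 16 + n1 + rolling) % 256
--         result.append(bv)
--         rolling = (key + rolling) % 256   # bounded rolling for string consts
--         i += 2
--     return result
-- ===== SOURCE B (Python) =====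
-- def _hex16_decode(s, nib_map, key):
--     # staged algorithm: chunk the string into (hi, lo) char pairs with the iter/zip
--     # trick, precompute the bounded additive cycle of key mod 256 ONCE and tile it
--     # into a shift schedule, then combine the three streams -- no per-pair rolling state.
--     it = iter(s)
--     pairs = list(zip(it, it))            # consecutive pairs; odd trailing char dropped
--     cycle = [key % 256]                  # cycle[j] = key*(j+1) % 256; length <= 256
--     while (cycle[-1] + key) % 256 != cycle[0]:
--         cycle.append((cycle[-1] + key) % 256)
--     shifts = (cycle * (len(pairs) // len(cycle) + 1))[:len(pairs)]
--     return [(nib_map.get(a, 0) * 16 + nib_map.get(b, 0) + r) % 256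
--             for (a, b), r in zip(pairs, shifts)]
-- ===== Notes on version B (the rewrite author's own statement) =====
-- stated objective: alternative
-- what changed: Replaces A's per-pair rolling-key accumulator with a staged pipeline: chunk the string into char pairs (iter/zip trick), precompute the bounded additive cycle of key mod 256 once and tile it into a shift schedule, then combine the streams with zip.
import Mathlib
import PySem

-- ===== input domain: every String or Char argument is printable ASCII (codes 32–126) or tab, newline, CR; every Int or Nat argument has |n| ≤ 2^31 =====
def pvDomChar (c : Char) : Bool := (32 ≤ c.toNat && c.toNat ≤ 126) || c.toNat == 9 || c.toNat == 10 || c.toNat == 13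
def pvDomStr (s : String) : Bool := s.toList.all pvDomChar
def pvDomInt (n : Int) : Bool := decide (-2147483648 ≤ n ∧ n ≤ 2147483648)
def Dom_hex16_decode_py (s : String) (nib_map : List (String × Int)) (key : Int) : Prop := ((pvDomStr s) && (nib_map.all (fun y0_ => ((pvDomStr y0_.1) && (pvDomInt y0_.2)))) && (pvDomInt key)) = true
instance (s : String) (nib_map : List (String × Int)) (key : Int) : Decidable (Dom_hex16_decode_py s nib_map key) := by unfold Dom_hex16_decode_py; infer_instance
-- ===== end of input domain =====

-- B replaces A's per-pair rolling-key accumulator with staged passes: pair chunking, a precomputed (≤256-entry) additive key cycle tiled into a shift schedule, and a zip (alternative decomposition, same cost).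


-- ===== PORT A =====
-- dict.get(c, 0) on a dict keyed by 1-char strings: first-match association lookup
def nibGet (nm : List (String × Int)) (c : Char) : Int :=
  match nm with
  | [] => 0
  | (k, v) :: rest => if k = String.ofList [c] then v else nibGet rest c

-- while i+1 < len(s): consume two chars per step, carrying the rolling key
def hexA_loop (nm : List (String × Int)) (key : Int) : List Char → Int → List Int
  | c0 :: c1 :: rest, rolling =>
      PySem.Int.mod (nibGet nm c0 * 16 + nibGet nm c1 + rolling) 256 ::
        hexA_loop nm key rest (PySem.Int.mod (key + rolling) 256)
  | _, _ => []

def hex16_decode_py (s : String) (nib_map : List (String × Int)) (key : Int) : List Int :=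
  hexA_loop nib_map key s.toList key

-- ===== PORT B =====
-- list(zip(it, it)) on it = iter(s): consecutive pairs, odd trailing element dropped
def toPairs {α : Type} : List α → List (α × α)
  | a :: b :: r => (a, b) :: toPairs r
  | _ => []

-- 'while (cycle[-1]+key)%256 != cycle[0]: cycle.append((cycle[-1]+key)%256)', carrying
-- first, last and the list; fuel 256 is exact: the loop stops as soon as
-- key*len(cycle) % 256 == 0, which holds at len = 256 at the latest, so the Python
-- loop appends at most 255 times and the fuel is never exhausted.
def buildCycle (key first last : Int) (acc : List Int) : Nat → List Int
  | 0 => acc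
  | fuel + 1 =>
    if PySem.Int.mod (last + key) 256 ≠ first then
      buildCycle key first (PySem.Int.mod (last + key) 256)
        (acc ++ [PySem.Int.mod (last + key) 256]) fuel
    else acc

def hex16_decode_py_alt (s : String) (nib_map : List (String × Int)) (key : Int) : List Int :=
  let pairs := toPairs s.toList
  let k0 := PySem.Int.mod key 256
  let cycle := buildCycle key k0 k0 [k0] 256
  let shifts := ((List.replicate (pairs.length / cycle.length + 1) cycle).flatten).take pairs.length
  (pairs.zip shifts).map fun pr =>
    PySem.Int.mod (nibGet nib_map pr.1.1 * 16 + nibGet nib_map pr.1.2 + pr.2) 256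

-- ===== PRECONDITION & SPEC =====
def Spec_hex16_decode_py (s : String) (nib_map : List (String × Int)) (key : Int) (out : List Int) : Prop := out = hex16_decode_py_alt s nib_map key
instance (s : String) (nib_map : List (String × Int)) (key : Int) (out : List Int) : Decidable (Spec_hex16_decode_py s nib_map key out) := by unfold Spec_hex16_decode_py; infer_instance

-- ===== CLAIM (what is proved, stated in full; the proofs are below) =====
def Claim_equal_hex16_decode_py : Prop := ∀ (s : String) (nib_map : List (String × Int)) (key : Int), Dom_hex16_decode_py s nib_map key → Spec_hex16_decode_py s nib_map key (hex16_decode_py s nib_map key)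

-- ===== LEMMAS AND PROOFS =====

-- the shift at pair index j (both programs produce it, by different means)
def shiftAt (key : Int) (j : Nat) : Int := PySem.Int.mod (key * ((j : Int) + 1)) 256

theorem mod256 (x : Int) : PySem.Int.mod x 256 = x % 256 :=
  PySem.Int.mod_eq_emod_of_pos (by norm_num)

-- proof-side common recursive form: pair-by-pair with the pair index carried
def bRec (nm : List (String × Int)) (key : Int) : List Char → Int → List Int
  | c0 :: c1 :: rest, j =>
      PySem.Int.mod (nibGet nm c0 * 16 + nibGet nm c1 + key * (j + 1)) 256 :: bRec nm key rest (j + 1)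
  | _, _ => []

theorem loop_eq_bRec (nm : List (String × Int)) (key : Int) :
    ∀ (cs : List Char) (r j : Int), r % 256 = (key * (j + 1)) % 256 →
      hexA_loop nm key cs r = bRec nm key cs j
  | [], _, _, _ => rfl
  | [_], _, _, _ => rfl
  | c0 :: c1 :: rest, r, j, h => by
    simp only [hexA_loop, bRec, mod256]
    congr 1
    · conv_lhs => rw [Int.add_emod, h, ← Int.add_emod]
    · rw [loop_eq_bRec nm key rest ((key + r) % 256) (j + 1) ?_]
      rw [Int.emod_emod_of_dvd _ (dvd_refl _), Int.add_emod, h, ← Int.add_emod]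
      ring_nf

-- the cycle loop builds exactly the list of shifts 0..L-1, for an L with key*L ≡ 0 (mod 256)
theorem buildCycle_spec (key : Int) :
    ∀ (fuel m : Nat), 1 ≤ m → m ≤ 256 → 256 < fuel + m →
      ∃ L : Nat, 1 ≤ L ∧ L ≤ 256 ∧ (key * (L : Int)) % 256 = 0 ∧
        buildCycle key (PySem.Int.mod key 256) (PySem.Int.mod (key * (m : Int)) 256)
            ((List.range m).map (shiftAt key)) fuel
          = (List.range L).map (shiftAt key)
  | 0, m, _, h256, hsum => absurd hsum (by omega)
  | fuel + 1, m, hm, h256, hsum => by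
    by_cases hc : PySem.Int.mod (PySem.Int.mod (key * (m : Int)) 256 + key) 256 = PySem.Int.mod key 256
    · refine ⟨m, hm, h256, ?_, ?_⟩
      · have h : (key * (m : Int) + key) % 256 = key % 256 := by
          have h0 := hc
          simp only [mod256] at h0
          rwa [Int.add_emod, Int.emod_emod_of_dvd _ (dvd_refl _), ← Int.add_emod] at h0
        omega
      · simp only [buildCycle]
        rw [if_neg (not_not_intro hc)]
    · -- loop continues: m < 256 (at m = 256 the condition is necessarily false)
      have hmlt : m < 256 := by
        rcases Nat.lt_or_ge m 256 with h | h
        · exact h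
        · exfalso; apply hc
          have hm256 : m = 256 := le_antisymm h256 h
          subst hm256
          simp only [mod256]
          rw [Int.add_emod, Int.emod_emod_of_dvd _ (dvd_refl _), ← Int.add_emod]
          push_cast
          omega
      have hstep : PySem.Int.mod (PySem.Int.mod (key * (m : Int)) 256 + key) 256
          = PySem.Int.mod (key * ((m + 1 : Nat) : Int)) 256 := by
        simp only [mod256]
        rw [Int.add_emod, Int.emod_emod_of_dvd _ (dvd_refl _), ← Int.add_emod]
        congr 1
        push_cast
        ring
      have hrange : (List.range m).map (shiftAt key) ++ [PySem.Int.mod (key * ((m + 1 : Nat) : Int)) 256]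
          = (List.range (m + 1)).map (shiftAt key) := by
        rw [List.range_succ, List.map_append]
        congr 1
      obtain ⟨L, hL1, hL2, hL3, hL4⟩ :=
        buildCycle_spec key fuel (m + 1) (by omega) (by omega) (by omega)
      refine ⟨L, hL1, hL2, hL3, ?_⟩
      have hcond : PySem.Int.mod (key * ((m + 1 : Nat) : Int)) 256 ≠ PySem.Int.mod key 256 := by
        rw [← hstep]; exact hc
      simp only [buildCycle]
      rw [hstep, hrange, if_pos hcond]
      exact hL4

-- tiling: n copies of the length-L cycle, elementwise
theorem flatten_replicate (f : Nat → Int) (L : Nat) :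
    ∀ n : Nat, (List.replicate n ((List.range L).map f)).flatten
      = (List.range (n * L)).map (fun k => f (k % L))
  | 0 => by simp
  | n + 1 => by
    rw [List.replicate_succ, List.flatten_cons, flatten_replicate f L n,
      show (n + 1) * L = L + n * L by ring, List.range_add, List.map_append]
    congr 1
    · exact List.map_congr_left fun k hk => by
        rw [Nat.mod_eq_of_lt (List.mem_range.mp hk)]
    · rw [List.map_map]
      exact List.map_congr_left fun k _ => by
        simp only [Function.comp_apply]
        rw [Nat.add_mod_left]

-- the tiled schedule agrees with shiftAt everywhere, given key*L ≡ 0 (mod 256)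
theorem shift_tile (key : Int) (L : Nat) (hkey : (key * (L : Int)) % 256 = 0)
    (k : Nat) : shiftAt key (k % L) = shiftAt key k := by
  simp only [shiftAt, mod256]
  have hk : (k : Int) = (L : Int) * ((k / L : Nat) : Int) + ((k % L : Nat) : Int) := by
    exact_mod_cast (Nat.div_add_mod k L).symm
  have hsplit : key * ((k : Int) + 1)
      = key * (((k % L : Nat) : Int) + 1) + key * (L : Int) * ((k / L : Nat) : Int) := by
    rw [hk]; ring
  obtain ⟨c, hcc⟩ : (256 : Int) ∣ key * (L : Int) * ((k / L : Nat) : Int) :=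
    (Int.dvd_of_emod_eq_zero hkey).mul_right _
  rw [hsplit, hcc]
  omega

-- combining the pair stream with any schedule that is shiftAt (offset by j) gives bRec
theorem zip_eq_bRec (nm : List (String × Int)) (key : Int) :
    ∀ (cs : List Char) (j : Nat),
      (((toPairs cs).zip ((List.range (toPairs cs).length).map (fun k => shiftAt key (k + j)))).map
        fun pr => PySem.Int.mod (nibGet nm pr.1.1 * 16 + nibGet nm pr.1.2 + pr.2) 256)
        = bRec nm key cs (j : Int)
  | [], _ => rfl
  | [_], _ => rfl
  | c0 :: c1 :: rest, j => by
    simp only [toPairs, List.length_cons, List.range_succ_eq_map, List.map_cons, List.zip_cons_cons,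
      List.map_map, bRec]
    congr 1
    · simp only [shiftAt, mod256, Nat.zero_add]
      omega
    · have hrec := zip_eq_bRec nm key rest (j + 1)
      rw [show ((j : Int) + 1) = ((j + 1 : Nat) : Int) by push_cast; ring, ← hrec]
      congr 1
      congr 1
      exact List.map_congr_left fun k _ => by
        simp only [Function.comp_apply]
        congr 1
        omega

theorem hex16_decode_py_spec : Claim_equal_hex16_decode_py := by
  intro s nm key _
  unfold Spec_hex16_decode_py hex16_decode_py
  rw [loop_eq_bRec nm key s.toList key 0 (by ring_nf)]
  simp only [hex16_decode_py_alt]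
  obtain ⟨L, hL1, hL2, hL3, hL4⟩ := buildCycle_spec key 256 1 le_rfl (by omega) (by omega)
  have hinit : (List.range 1).map (shiftAt key) = [PySem.Int.mod key 256] := by
    simp [shiftAt]
  have hlast : PySem.Int.mod (key * ((1 : Nat) : Int)) 256 = PySem.Int.mod key 256 := by norm_num
  rw [hinit, hlast] at hL4
  rw [hL4]
  have hlen : ((List.range L).map (shiftAt key)).length = L := by simp
  set np := (toPairs s.toList).length with hnp
  have hnpL : np ≤ (np / L + 1) * L := by
    have hmod : np % L < L := Nat.mod_lt _ (by omega)
    have hdm : L * (np / L) + np % L = np := Nat.div_add_mod np L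
    have hmul : (np / L + 1) * L = L * (np / L) + L := by ring
    omega
  rw [hlen, flatten_replicate (shiftAt key) L (np / L + 1), ← List.map_take, List.take_range,
    Nat.min_eq_left hnpL]
  have hsched : (List.range np).map (fun k => shiftAt key (k % L))
      = (List.range np).map (fun k => shiftAt key (k + 0)) :=
    List.map_congr_left fun k _ => by
      rw [shift_tile key L hL3 k, Nat.add_zero]
  rw [hsched, hnp, zip_eq_bRec nm key s.toList 0]
  norm_num
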